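-- pv_equiv track=rewrite | github.com/pcorliss/advent_of_code | 2024/21/daily.py | direction_length
-- ===== SOURCE A (Python) =====
-- digit_pos = {
--   'A': (2, 3),
--   '0': (1, 3),
--   '1': (0, 2),
--   '2': (1, 2),
--   '3': (2, 2),
--   '4': (0, 1),
--   '5': (1, 1),
--   '6': (2, 1),
--   '7': (0, 0),
--   '8': (1, 0),
--   '9': (2, 0),
--   'B': (0, 3),
-- }
--
-- dpad_pos = {
--   '^': (1, 0),
--   'A': (2, 0),
--   '<': (0, 1),
--   'v': (1, 1),
--   '>': (2, 1),
--   'B': (0, 0),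
-- }
--
-- START_POS = 'A'
--
-- DIGIT = 0
--
-- DPAD = 1
--
-- def direction_options(pad_pos, target_pos, pad_type):
--   dx = target_pos[0] - pad_pos[0]
--   dy = target_pos[1] - pad_pos[1]
--   blank_pos = digit_pos['B'] if pad_type == DIGIT else dpad_pos['B']
--   x_cmds = list('>' * dx if dx > 0 else '<' * -dx) if dx != 0 else []
--   y_cmds = list('v' * dy if dy > 0 else '^' * -dy) if dy != 0 else []
--   # Account for the blank space we're trying to avoid
--   if dx + pad_pos[0] == blank_pos[0] and pad_pos[1] == blank_pos[1]:
--     return [y_cmds + x_cmds]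
--   elif dy + pad_pos[1] == blank_pos[1] and pad_pos[0] == blank_pos[0]:
--     return [x_cmds + y_cmds]
--   else:
--     return [x_cmds + y_cmds, y_cmds + x_cmds]
--
-- dlength_cache = {}
--
-- def direction_length(directions, depth, start_pos = (2, 3), pad_type = DIGIT):
--   if depth == 0:
--     return len(directions)
--
--   cache_key = (tuple(directions), depth, start_pos, pad_type)
--   if cache_key in dlength_cache:
--     return dlength_cache[cache_key]
--
--   new_pad_type = pad_type
--   pad_start = dpad_pos[START_POS]
--   if pad_type == DIGIT:
--     new_pad_type = DPAD
--
--   pos = start_pos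
--   sum = 0
--   for d in directions:
--     target_pos = digit_pos[d] if pad_type == DIGIT else dpad_pos[d]
--     options = direction_options(pos, target_pos, pad_type)
--     sum += min(direction_length(option + ['A'], depth - 1, pad_start, new_pad_type) for option in options)
--     pos = target_pos
--
--   dlength_cache[cache_key] = sum
--   return sum
-- ===== SOURCE B (Python) =====
-- digit_pos = {
--   'A': (2, 3), '0': (1, 3), '1': (0, 2), '2': (1, 2), '3': (2, 2),
--   '4': (0, 1), '5': (1, 1), '6': (2, 1), '7': (0, 0), '8': (1, 0),
--   '9': (2, 0), 'B': (0, 3),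
-- }
--
-- dpad_pos = {
--   '^': (1, 0), 'A': (2, 0), '<': (0, 1), 'v': (1, 1), '>': (2, 1), 'B': (0, 0),
-- }
--
-- DIGIT = 0
-- DPAD = 1
--
-- DPAD_KEYS = ['^', 'A', '<', 'v', '>', 'B']
--
--
-- def move_options(p, q, pad_type):
--   blank = digit_pos['B'] if pad_type == DIGIT else dpad_pos['B']
--   horiz = ['>'] * (q[0] - p[0]) if q[0] > p[0] else ['<'] * (p[0] - q[0])
--   vert = ['v'] * (q[1] - p[1]) if q[1] > p[1] else ['^'] * (p[1] - q[1])
--   if (q[0], p[1]) == blank: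
--     return [vert + horiz]
--   if (p[0], q[1]) == blank:
--     return [horiz + vert]
--   return [horiz + vert, vert + horiz]
--
--
-- def seq_cost(option, table):
--   seq = ['A'] + option + ['A']
--   return sum(table[(a, b)] for a, b in zip(seq, seq[1:]))
--
--
-- def direction_length(directions, depth, start_pos=(2, 3), pad_type=DIGIT):
--   if depth == 0 or not directions:
--     return len(directions)
--   # bottom-up DP: per-level cost table over the 36 ordered pairs of dpad keys
--   table = {(a, b): min(len(o) + 1 for o in move_options(dpad_pos[a], dpad_pos[b], DPAD))
--            for a in DPAD_KEYS for b in DPAD_KEYS}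
--   for _ in range(depth - 2):
--     table = {(a, b): min(seq_cost(o, table) for o in move_options(dpad_pos[a], dpad_pos[b], DPAD))
--              for a in DPAD_KEYS for b in DPAD_KEYS}
--   pad = digit_pos if pad_type == DIGIT else dpad_pos
--   targets = [pad[d] for d in directions]
--   total = 0
--   for p, q in zip([start_pos] + targets, targets):
--     opts = move_options(p, q, pad_type)
--     if depth == 1:
--       total += min(len(o) + 1 for o in opts)
--     else:
--       total += min(seq_cost(o, table) for o in opts)
--   return total
-- ===== Notes on version B (the rewrite author's own statement) =====
-- stated objective: alternative
-- what changed: Replaced A's top-down memoized recursion over whole direction sequences by a bottom-up iterative DP: a cost table keyed by pairs of directional-keypad key names is rebuilt level by level up to depth-1, and the answer is one pass over consecutive position pairs (zip) summing the minimum per-move table cost; no recursion and no sequence-keyed cache remain.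
import Mathlib
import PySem

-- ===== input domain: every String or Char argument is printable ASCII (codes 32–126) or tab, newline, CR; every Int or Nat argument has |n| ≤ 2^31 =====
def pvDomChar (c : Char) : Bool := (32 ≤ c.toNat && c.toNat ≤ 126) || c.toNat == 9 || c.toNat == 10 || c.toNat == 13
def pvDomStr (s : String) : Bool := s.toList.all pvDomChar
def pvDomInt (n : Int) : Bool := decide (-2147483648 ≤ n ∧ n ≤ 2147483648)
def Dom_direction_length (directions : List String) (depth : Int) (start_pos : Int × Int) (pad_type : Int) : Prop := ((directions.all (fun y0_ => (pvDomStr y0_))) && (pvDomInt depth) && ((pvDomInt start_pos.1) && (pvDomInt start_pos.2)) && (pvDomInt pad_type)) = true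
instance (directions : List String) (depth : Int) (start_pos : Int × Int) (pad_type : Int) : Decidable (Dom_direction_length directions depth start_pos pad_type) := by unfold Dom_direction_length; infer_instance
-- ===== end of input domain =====

-- B replaces A's top-down memoized recursion over direction sequences by a bottom-up DP that
-- rebuilds, level by level, a cost table keyed by pairs of directional-keypad KEY NAMES and sums
-- consecutive-pair costs with zips (objective: alternative decomposition; return values only —
-- A also mutates its process-global memo dict, which B does not have).

-- ===== PORT A =====
def digitLookup (s : String) : Int × Int :=
  if s = "A" then (2, 3) else if s = "0" then (1, 3) else if s = "1" then (0, 2)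
  else if s = "2" then (1, 2) else if s = "3" then (2, 2) else if s = "4" then (0, 1)
  else if s = "5" then (1, 1) else if s = "6" then (2, 1) else if s = "7" then (0, 0)
  else if s = "8" then (1, 0) else if s = "9" then (2, 0) else (0, 3)  -- "B"; KeyError default outside Pre_

def dpadLookup (s : String) : Int × Int :=
  if s = "^" then (1, 0) else if s = "A" then (2, 0) else if s = "<" then (0, 1)
  else if s = "v" then (1, 1) else if s = ">" then (2, 1) else (0, 0)  -- "B"; KeyError default outside Pre_

def xCmds (dx : Int) : List String :=
  if dx ≠ 0 then (if dx > 0 then List.replicate dx.toNat ">" else List.replicate (-dx).toNat "<") else []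

def yCmds (dy : Int) : List String :=
  if dy ≠ 0 then (if dy > 0 then List.replicate dy.toNat "v" else List.replicate (-dy).toNat "^") else []

def directionOptions (padPos targetPos : Int × Int) (padType : Int) : List (List String) :=
  let dx := targetPos.1 - padPos.1
  let dy := targetPos.2 - padPos.2
  let blankPos : Int × Int := if padType = 0 then (0, 3) else (0, 0)
  let x_cmds := xCmds dx
  let y_cmds := yCmds dy
  if dx + padPos.1 = blankPos.1 ∧ padPos.2 = blankPos.2 then [y_cmds ++ x_cmds]
  else if dy + padPos.2 = blankPos.2 ∧ padPos.1 = blankPos.1 then [x_cmds ++ y_cmds]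
  else [x_cmds ++ y_cmds, y_cmds ++ x_cmds]

-- Python's min() over a nonempty list of ints
def intMin : List Int → Int
  | [] => 0
  | h :: t => t.foldl min h

-- A's memo cache (Python's process-global dlength_cache, threaded explicitly)
def ACache : Type := PySem.Dict (List String × Int × (Int × Int) × Int) Int

-- A's recursion with its cache, on the Nat image of depth (Python recurses depth times; negative
-- depth with nonempty directions recurses without bound and is outside Pre_)
def dlA : Nat → List String → (Int × Int) → Int → ACache → Int × ACache
  | 0, dirs, _, _, c => ((dirs.length : Int), c)
  | n + 1, dirs, sp, pt, c =>
    let key : List String × Int × (Int × Int) × Int := (dirs, (n : Int) + 1, sp, pt)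
    match c.get? key with
    | some v => (v, c)
    | none =>
      let npt : Int := if pt = 0 then 1 else pt
      let r := dirs.foldl
        (fun (st : (Int × Int) × Int × ACache) d =>
          let tgt := if pt = 0 then digitLookup d else dpadLookup d
          let vc := (directionOptions st.1 tgt pt).foldl
            (fun (ac : List Int × ACache) o =>
              let p := dlA n (o ++ ["A"]) (2, 0) npt ac.2
              (ac.1 ++ [p.1], p.2))
            ([], st.2.2)
          (tgt, st.2.1 + intMin vc.1, vc.2))
        (sp, 0, c)
      (r.2.1, r.2.2.insert key r.2.1)

def direction_length (directions : List String) (depth : Int) (start_pos : Int × Int) (pad_type : Int) : Int :=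
  if depth = 0 then (directions.length : Int)
  else (dlA depth.toNat directions start_pos pad_type PySem.Dict.empty).1

-- ===== PORT B =====
def digit_map : PySem.Dict String (Int × Int) :=
  PySem.Dict.ofList [("A", (2, 3)), ("0", (1, 3)), ("1", (0, 2)), ("2", (1, 2)), ("3", (2, 2)),
    ("4", (0, 1)), ("5", (1, 1)), ("6", (2, 1)), ("7", (0, 0)), ("8", (1, 0)), ("9", (2, 0)), ("B", (0, 3))]

def dpad_map : PySem.Dict String (Int × Int) :=
  PySem.Dict.ofList [("^", (1, 0)), ("A", (2, 0)), ("<", (0, 1)), ("v", (1, 1)), (">", (2, 1)), ("B", (0, 0))]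

def dpadKeysB : List String := ["^", "A", "<", "v", ">", "B"]

def moveOptions (p q : Int × Int) (pad_type : Int) : List (List String) :=
  let blank : Int × Int := if pad_type = 0 then (0, 3) else (0, 0)
  let horiz := if q.1 > p.1 then List.replicate (q.1 - p.1).toNat ">" else List.replicate (p.1 - q.1).toNat "<"
  let vert := if q.2 > p.2 then List.replicate (q.2 - p.2).toNat "v" else List.replicate (p.2 - q.2).toNat "^"
  if (q.1, p.2) = blank then [vert ++ horiz]
  else if (p.1, q.2) = blank then [horiz ++ vert]
  else [horiz ++ vert, vert ++ horiz]

-- sum(table[(a, b)] for a, b in zip(seq, seq[1:])) with seq = ['A'] + option + ['A']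
-- (table[...] ported as getD 0; a missing key is Python's KeyError, outside Pre_)
def seqCost (option : List String) (table : PySem.Dict (String × String) Int) : Int :=
  let seq := "A" :: option ++ ["A"]
  ((seq.zip (seq.drop 1)).map (fun ab => table.getD ab 0)).sum

-- the dict comprehension {(a, b): f a b for a in DPAD_KEYS for b in DPAD_KEYS}
def mkTable (f : String → String → Int) : PySem.Dict (String × String) Int :=
  dpadKeysB.foldl (fun t a => dpadKeysB.foldl (fun t b => t.insert (a, b) (f a b)) t) PySem.Dict.empty

def direction_length_alt (directions : List String) (depth : Int) (start_pos : Int × Int) (pad_type : Int) : Int :=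
  if depth = 0 ∨ directions = [] then (directions.length : Int)
  else
    let base := mkTable (fun a b =>
      intMin ((moveOptions (dpad_map.getD a (0, 0)) (dpad_map.getD b (0, 0)) 1).map
        (fun o => (o.length : Int) + 1)))
    let table := (PySem.List.pyRange 0 (depth - 2) 1).foldl
      (fun t _ => mkTable (fun a b =>
        intMin ((moveOptions (dpad_map.getD a (0, 0)) (dpad_map.getD b (0, 0)) 1).map
          (fun o => seqCost o t))))
      base
    let pad := if pad_type = 0 then digit_map else dpad_map
    let targets := directions.map (fun d => pad.getD d (0, 0))
    ((start_pos :: targets).zip targets).foldl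
      (fun total pq =>
        total + (if depth = 1 then intMin ((moveOptions pq.1 pq.2 pad_type).map (fun o => (o.length : Int) + 1))
                 else intMin ((moveOptions pq.1 pq.2 pad_type).map (fun o => seqCost o table))))
      0

-- ===== PRECONDITION & SPEC =====
def digitKeys : List String := ["A", "0", "1", "2", "3", "4", "5", "6", "7", "8", "9", "B"]
def dpadKeys : List String := ["^", "A", "<", "v", ">", "B"]

-- Pre_ excludes inputs on which Python A raises or whose behaviour depends on the interpreter
-- configuration: unknown pad keys (KeyError), negative depth with nonempty directions (recursion
-- that never reaches 0, RecursionError), and depths above 330 with nonempty directions, where A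
-- recurses one Python call chain per depth level and raises RecursionError under CPython's default
-- recursion limit (first crash measured at depth 333 on a fresh cache; under a raised limit A
-- still returns and agrees with B there — such excluded-but-returning inputs are cited in the claim).
def Pre_direction_length (directions : List String) (depth : Int) (start_pos : Int × Int) (pad_type : Int) : Prop :=
  depth = 0 ∨ directions = [] ∨
    (1 ≤ depth ∧ depth ≤ 330 ∧ ∀ s ∈ directions, s ∈ (if pad_type = 0 then digitKeys else dpadKeys))

instance (directions : List String) (depth : Int) (start_pos : Int × Int) (pad_type : Int) : Decidable (Pre_direction_length directions depth start_pos pad_type) := by unfold Pre_direction_length; infer_instance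

def pvWitness_direction_length : List String × Int × (Int × Int) × Int := (["0", "2", "9", "A"], 2, (2, 3), 0)

def Spec_direction_length (directions : List String) (depth : Int) (start_pos : Int × Int) (pad_type : Int) (out : Int) : Prop := out = direction_length_alt directions depth start_pos pad_type
instance (directions : List String) (depth : Int) (start_pos : Int × Int) (pad_type : Int) (out : Int) : Decidable (Spec_direction_length directions depth start_pos pad_type out) := by unfold Spec_direction_length; infer_instance

-- ===== CLAIM (what is proved, stated in full; the proofs are below) =====
def Claim_equal_direction_length : Prop := ∀ (directions : List String) (depth : Int) (start_pos : Int × Int) (pad_type : Int), Dom_direction_length directions depth start_pos pad_type → Pre_direction_length directions depth start_pos pad_type → Spec_direction_length directions depth start_pos pad_type (direction_length directions depth start_pos pad_type)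

-- ===== LEMMAS AND PROOFS =====

-- pure (cache-free) specification of A's recursion
def dlP : List String → Nat → (Int × Int) → Int → Int
  | dirs, 0, _, _ => (dirs.length : Int)
  | dirs, n + 1, sp, pt =>
    let npt : Int := if pt = 0 then 1 else pt
    (dirs.foldl
      (fun (st : (Int × Int) × Int) d =>
        let tgt := if pt = 0 then digitLookup d else dpadLookup d
        (tgt, st.2 + intMin ((directionOptions st.1 tgt pt).map (fun o => dlP (o ++ ["A"]) n (2, 0) npt))))
      (sp, 0)).2

lemma dlP_nil (n : Nat) (sp : Int × Int) (pt : Int) : dlP [] n sp pt = 0 := by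
  cases n <;> simp [dlP]

-- every cache entry stores the pure value of its key
def GoodCache (c : ACache) : Prop :=
  ∀ k v, c.get? k = some v → v = dlP k.1 k.2.1.toNat k.2.2.1 k.2.2.2

lemma goodCache_empty : GoodCache PySem.Dict.empty := by
  intro k v h
  simp [PySem.Dict.get?_empty] at h

lemma optsFold (n : Nat) (npt : Int)
    (IH : ∀ dirs sp pt c, GoodCache c →
      (dlA n dirs sp pt c).1 = dlP dirs n sp pt ∧ GoodCache (dlA n dirs sp pt c).2) :
    ∀ (os : List (List String)) (acc : List Int) (c : ACache), GoodCache c →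
      (os.foldl (fun (ac : List Int × ACache) o =>
          let p := dlA n (o ++ ["A"]) (2, 0) npt ac.2
          (ac.1 ++ [p.1], p.2)) (acc, c)).1
        = acc ++ os.map (fun o => dlP (o ++ ["A"]) n (2, 0) npt)
      ∧ GoodCache (os.foldl (fun (ac : List Int × ACache) o =>
          let p := dlA n (o ++ ["A"]) (2, 0) npt ac.2
          (ac.1 ++ [p.1], p.2)) (acc, c)).2 := by
  intro os
  induction os with
  | nil => intro acc c hc; exact ⟨by simp, hc⟩
  | cons o t ih =>
    intro acc c hc
    simp only [List.foldl_cons, List.map_cons]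
    obtain ⟨hv, hg⟩ := IH (o ++ ["A"]) (2, 0) npt c hc
    obtain ⟨h1, h2⟩ := ih (acc ++ [(dlA n (o ++ ["A"]) (2, 0) npt c).1]) (dlA n (o ++ ["A"]) (2, 0) npt c).2 hg
    refine ⟨?_, h2⟩
    rw [h1, hv, List.append_assoc]
    rfl

lemma innerFoldA (n : Nat) (pt npt : Int)
    (IH : ∀ dirs sp pt c, GoodCache c →
      (dlA n dirs sp pt c).1 = dlP dirs n sp pt ∧ GoodCache (dlA n dirs sp pt c).2) :
    ∀ (l : List String) (pos : Int × Int) (s : Int) (c : ACache), GoodCache c →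
      (l.foldl (fun (st : (Int × Int) × Int × ACache) d =>
          let tgt := if pt = 0 then digitLookup d else dpadLookup d
          let vc := (directionOptions st.1 tgt pt).foldl
            (fun (ac : List Int × ACache) o =>
              let p := dlA n (o ++ ["A"]) (2, 0) npt ac.2
              (ac.1 ++ [p.1], p.2))
            ([], st.2.2)
          (tgt, st.2.1 + intMin vc.1, vc.2)) (pos, s, c)).2.1
        = (l.foldl (fun (st : (Int × Int) × Int) d =>
            let tgt := if pt = 0 then digitLookup d else dpadLookup d
            (tgt, st.2 + intMin ((directionOptions st.1 tgt pt).map (fun o => dlP (o ++ ["A"]) n (2, 0) npt))))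
            (pos, s)).2
      ∧ GoodCache (l.foldl (fun (st : (Int × Int) × Int × ACache) d =>
          let tgt := if pt = 0 then digitLookup d else dpadLookup d
          let vc := (directionOptions st.1 tgt pt).foldl
            (fun (ac : List Int × ACache) o =>
              let p := dlA n (o ++ ["A"]) (2, 0) npt ac.2
              (ac.1 ++ [p.1], p.2))
            ([], st.2.2)
          (tgt, st.2.1 + intMin vc.1, vc.2)) (pos, s, c)).2.2 := by
  intro l
  induction l with
  | nil => intro pos s c hc; exact ⟨rfl, hc⟩
  | cons d t ih =>
    intro pos s c hc
    simp only [List.foldl_cons]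
    obtain ⟨h1, h2⟩ := optsFold n npt IH
      (directionOptions pos (if pt = 0 then digitLookup d else dpadLookup d) pt) [] c hc
    rw [h1]
    exact ih _ _ _ h2

theorem dlA_correct (n : Nat) (dirs : List String) (sp : Int × Int) (pt : Int) (c : ACache)
    (hc : GoodCache c) :
    (dlA n dirs sp pt c).1 = dlP dirs n sp pt ∧ GoodCache (dlA n dirs sp pt c).2 := by
  induction n generalizing dirs sp pt c with
  | zero => exact ⟨rfl, hc⟩
  | succ n ih =>
    have IH : ∀ dirs sp pt c, GoodCache c →
        (dlA n dirs sp pt c).1 = dlP dirs n sp pt ∧ GoodCache (dlA n dirs sp pt c).2 :=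
      fun dirs sp pt c hc => ih dirs sp pt c hc
    cases hk : c.get? (dirs, (n : Int) + 1, sp, pt) with
    | some v =>
      have hv := hc _ _ hk
      simp only at hv
      have : ((n : Int) + 1).toNat = n + 1 := by omega
      rw [this] at hv
      simp only [dlA, hk]
      exact ⟨hv, hc⟩
    | none =>
      simp only [dlA, hk]
      obtain ⟨h1, h2⟩ := innerFoldA n pt (if pt = 0 then 1 else pt) IH dirs sp 0 c hc
      constructor
      · rw [h1]; simp [dlP]
      · intro k v hkv
        rw [PySem.Dict.get?_insert] at hkv
        by_cases hkey : k = (dirs, (n : Int) + 1, sp, pt)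
        · rw [if_pos hkey] at hkv
          subst hkey
          cases hkv
          simp only
          rw [h1]
          have : ((n : Int) + 1).toNat = n + 1 := by omega
          rw [this]
          simp [dlP]
        · rw [if_neg hkey] at hkv
          exact h2 k v hkv

lemma direction_length_eq_dlP (dirs : List String) (depth : Int) (sp : Int × Int) (pt : Int) :
    direction_length dirs depth sp pt
      = if depth = 0 then (dirs.length : Int) else dlP dirs depth.toNat sp pt := by
  unfold direction_length
  by_cases h : depth = 0
  · simp [h]
  · rw [if_neg h, if_neg h, (dlA_correct depth.toNat dirs sp pt PySem.Dict.empty goodCache_empty).1]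

-- the cost A's pure recursion assigns to one directional-pad move at depth e+1
def TA (e : Nat) (p q : Int × Int) : Int :=
  intMin ((directionOptions p q 1).map (fun o => dlP (o ++ ["A"]) e (2, 0) 1))

lemma directionOptions_ne_zero (p q : Int × Int) (pt : Int) (h : pt ≠ 0) :
    directionOptions p q pt = directionOptions p q 1 := by
  simp [directionOptions, h]

lemma dlP_ne_zero (n : Nat) (dirs : List String) (sp : Int × Int) (pt : Int) (h : pt ≠ 0) :
    dlP dirs n sp pt = dlP dirs n sp 1 := by
  induction n generalizing dirs sp with
  | zero => rfl
  | succ n ih =>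
    have e1 : ∀ p q : Int × Int, directionOptions p q pt = directionOptions p q 1 :=
      fun p q => directionOptions_ne_zero p q pt h
    simp [dlP, h, e1, ih]

lemma dlP_one_eq_walk (n : Nat) (dirs : List String) (sp : Int × Int) :
    dlP dirs (n + 1) sp 1 =
      (dirs.foldl (fun (st : (Int × Int) × Int) d => (dpadLookup d, st.2 + TA n st.1 (dpadLookup d))) (sp, 0)).2 := by
  simp [dlP, TA]

-- generic loop-shape bridges -------------------------------------------------

lemma walk_congr2 {α : Type} (lk lk' : String → α) (c c' : α → α → Int)
    (hc : ∀ p q, c p q = c' p q) :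
    ∀ (l : List String), (∀ d ∈ l, lk d = lk' d) → ∀ (pos : α) (acc : Int),
      (l.foldl (fun (st : α × Int) d => (lk d, st.2 + c st.1 (lk d))) (pos, acc)).2
      = (l.foldl (fun (st : α × Int) d => (lk' d, st.2 + c' st.1 (lk' d))) (pos, acc)).2 := by
  intro l
  induction l with
  | nil => intro _ pos acc; rfl
  | cons d t ih =>
    intro h pos acc
    simp only [List.foldl_cons]
    rw [hc, h d (List.mem_cons_self), ih (fun x hx => h x (List.mem_cons_of_mem _ hx))]

lemma posWalk_eq_charWalk (cP : (Int × Int) → (Int × Int) → Int) (cC : String → String → Int)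
    (h : ∀ a ∈ dpadKeysB, ∀ b ∈ dpadKeysB, cC a b = cP (dpadLookup a) (dpadLookup b)) :
    ∀ (l : List String), (∀ s ∈ l, s ∈ dpadKeysB) → ∀ (prev : String), prev ∈ dpadKeysB → ∀ (acc : Int),
      (l.foldl (fun (st : (Int × Int) × Int) d => (dpadLookup d, st.2 + cP st.1 (dpadLookup d))) (dpadLookup prev, acc)).2
      = (l.foldl (fun (st : String × Int) d => (d, st.2 + cC st.1 d)) (prev, acc)).2 := by
  intro l
  induction l with
  | nil => intro _ prev _ acc; rfl
  | cons d t ih =>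
    intro hl prev hprev acc
    simp only [List.foldl_cons]
    rw [h prev hprev d (hl d (List.mem_cons_self))]
    exact ih (fun x hx => hl x (List.mem_cons_of_mem _ hx)) d (hl d (List.mem_cons_self)) _

lemma foldShift {α : Type} (f : α → String → α) (g : α → String → Int) :
    ∀ (l : List String) (p : α) (a : Int),
      (l.foldl (fun (st : α × Int) d => (f st.1 d, st.2 + g st.1 d)) (p, a)).2
      = a + (l.foldl (fun (st : α × Int) d => (f st.1 d, st.2 + g st.1 d)) (p, 0)).2 := by
  intro l
  induction l with
  | nil => intro p a; simp
  | cons d t ih =>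
    intro p a
    simp only [List.foldl_cons]
    rw [ih (f p d) (a + g p d), ih (f p d) (0 + g p d)]
    ring

lemma chainSum (g : String → String → Int) :
    ∀ (l : List String) (prev : String),
      (((prev :: l).zip l).map (fun ab => g ab.1 ab.2)).sum
      = (l.foldl (fun (st : String × Int) d => (d, st.2 + g st.1 d)) (prev, 0)).2 := by
  intro l
  induction l with
  | nil => intro prev; rfl
  | cons d t ih =>
    intro prev
    simp only [List.zip_cons_cons, List.map_cons, List.sum_cons, List.foldl_cons]
    rw [ih d, foldShift (fun (p : String) (d : String) => d) g t d (0 + g prev d)]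
    ring

lemma zipFold {α : Type} (lk : String → α) (c : α → α → Int) :
    ∀ (l : List String) (pos : α) (acc : Int),
      ((pos :: l.map lk).zip (l.map lk)).foldl (fun t pq => t + c pq.1 pq.2) acc
      = (l.foldl (fun (st : α × Int) d => (lk d, st.2 + c st.1 (lk d))) (pos, acc)).2 := by
  intro l
  induction l with
  | nil => intro pos acc; rfl
  | cons d t ih =>
    intro pos acc
    simp only [List.map_cons, List.zip_cons_cons, List.foldl_cons]
    exact ih (lk d) (acc + c pos (lk d))

-- the move options consist only of directional-pad keys ----------------------

lemma mem_xCmds (dx : Int) (s : String) (h : s ∈ xCmds dx) : s ∈ dpadKeysB := by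
  unfold xCmds at h
  split_ifs at h <;> first
    | (rw [List.eq_of_mem_replicate h]; decide)
    | simp at h

lemma mem_yCmds (dy : Int) (s : String) (h : s ∈ yCmds dy) : s ∈ dpadKeysB := by
  unfold yCmds at h
  split_ifs at h <;> first
    | (rw [List.eq_of_mem_replicate h]; decide)
    | simp at h

lemma optsShape (p q : Int × Int) (pt : Int) (o : List String) (ho : o ∈ directionOptions p q pt) :
    o = xCmds (q.1 - p.1) ++ yCmds (q.2 - p.2) ∨ o = yCmds (q.2 - p.2) ++ xCmds (q.1 - p.1) := by
  simp only [directionOptions] at ho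
  split_ifs at ho <;> simp_all

lemma optsArrow (p q : Int × Int) (pt : Int) (o : List String) (ho : o ∈ directionOptions p q pt)
    (s : String) (hs : s ∈ o) : s ∈ dpadKeysB := by
  rcases optsShape p q pt o ho with rfl | rfl <;>
    rcases List.mem_append.mp hs with h | h <;>
    first | exact mem_xCmds _ _ h | exact mem_yCmds _ _ h

-- B's move_options coincides with A's direction_options ----------------------

lemma optEq (p q : Int × Int) (pt : Int) : moveOptions p q pt = directionOptions p q pt := by
  have hx : (if q.1 > p.1 then List.replicate (q.1 - p.1).toNat ">"
              else List.replicate (p.1 - q.1).toNat "<") = xCmds (q.1 - p.1) := by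
    unfold xCmds
    split_ifs with h1 h2 h3 <;> first | rfl | omega |
      (rw [show (p.1 - q.1).toNat = 0 by omega]; rfl) | (congr 1; omega)
  have hy : (if q.2 > p.2 then List.replicate (q.2 - p.2).toNat "v"
              else List.replicate (p.2 - q.2).toNat "^") = yCmds (q.2 - p.2) := by
    unfold yCmds
    split_ifs with h1 h2 h3 <;> first | rfl | omega |
      (rw [show (p.2 - q.2).toNat = 0 by omega]; rfl) | (congr 1; omega)
  unfold moveOptions directionOptions
  simp only [hx, hy, Prod.ext_iff]
  split_ifs with a1 a2 b1 b2 <;> first | rfl | (exfalso; omega)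

-- key-name lookups coincide with A's lookups on the valid keys ---------------

lemma dmap_eq (a : String) (ha : a ∈ dpadKeysB) : dpad_map.getD a (0, 0) = dpadLookup a := by
  fin_cases ha <;> decide

lemma gmap_eq (a : String) (ha : a ∈ digitKeys) : digit_map.getD a (0, 0) = digitLookup a := by
  fin_cases ha <;> decide

-- the comprehension table: lookup of a present key ---------------------------

lemma getD_inner (p : String) (v : String → Int) :
    ∀ (Q : List String) (t : PySem.Dict (String × String) Int) (x : String × String),
      (Q.foldl (fun nt q' => nt.insert (p, q') (v q')) t).getD x 0 =
        if ∃ q ∈ Q, x = (p, q) then v x.2 else t.getD x 0 := by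
  intro Q
  induction Q with
  | nil => intro t x; simp
  | cons q' Q ih =>
    intro t x
    simp only [List.foldl_cons]
    rw [ih]
    by_cases hQ : ∃ q ∈ Q, x = (p, q)
    · simp [hQ]
    · by_cases hx : x = (p, q')
      · subst hx
        simp
      · rw [if_neg hQ, PySem.Dict.getD_insert, if_neg hx]
        have hcons : ¬ ∃ q ∈ q' :: Q, x = (p, q) := by
          rintro ⟨q, hq, rfl⟩
          rcases List.mem_cons.mp hq with rfl | hq
          · exact hx rfl
          · exact hQ ⟨q, hq, rfl⟩
        rw [if_neg hcons]

lemma getD_outer (v : String → String → Int) :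
    ∀ (Pl : List String) (t : PySem.Dict (String × String) Int) (x : String × String),
      (Pl.foldl (fun nt p' => dpadKeysB.foldl (fun nt q' => nt.insert (p', q') (v p' q')) nt) t).getD x 0 =
        if ∃ p ∈ Pl, ∃ q ∈ dpadKeysB, x = (p, q) then v x.1 x.2 else t.getD x 0 := by
  intro Pl
  induction Pl with
  | nil => intro t x; simp
  | cons p' Pl ih =>
    intro t x
    simp only [List.foldl_cons]
    rw [ih, getD_inner]
    by_cases hPl : ∃ p ∈ Pl, ∃ q ∈ dpadKeysB, x = (p, q)
    · have hc : ∃ p ∈ p' :: Pl, ∃ q ∈ dpadKeysB, x = (p, q) := by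
        rcases hPl with ⟨p, hp, hq⟩; exact ⟨p, List.mem_cons_of_mem _ hp, hq⟩
      rw [if_pos hPl, if_pos hc]
    · by_cases hx : ∃ q ∈ dpadKeysB, x = (p', q)
      · rcases hx with ⟨q, hq, rfl⟩
        have h1 : ∃ q' ∈ dpadKeysB, (p', q) = (p', q') := ⟨q, hq, rfl⟩
        have h2 : ∃ p ∈ p' :: Pl, ∃ q' ∈ dpadKeysB, (p', q) = (p, q') :=
          ⟨p', List.mem_cons_self, q, hq, rfl⟩
        rw [if_neg hPl, if_pos h1, if_pos h2]
      · have hcons : ¬ ∃ p ∈ p' :: Pl, ∃ q ∈ dpadKeysB, x = (p, q) := by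
          rintro ⟨p, hp, q, hq, rfl⟩
          rcases List.mem_cons.mp hp with rfl | hp
          · exact hx ⟨q, hq, rfl⟩
          · exact hPl ⟨p, hp, q, hq, rfl⟩
        rw [if_neg hPl, if_neg hx, if_neg hcons]

lemma getD_mkTable (f : String → String → Int) (a b : String)
    (ha : a ∈ dpadKeysB) (hb : b ∈ dpadKeysB) :
    (mkTable f).getD (a, b) 0 = f a b := by
  unfold mkTable
  rw [getD_outer f dpadKeysB PySem.Dict.empty (a, b), if_pos ⟨a, ha, b, hb, rfl⟩]

-- the level tables -----------------------------------------------------------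

def tblB : Nat → PySem.Dict (String × String) Int
  | 0 => mkTable (fun a b =>
      intMin ((moveOptions (dpad_map.getD a (0, 0)) (dpad_map.getD b (0, 0)) 1).map
        (fun o => (o.length : Int) + 1)))
  | k + 1 => mkTable (fun a b =>
      intMin ((moveOptions (dpad_map.getD a (0, 0)) (dpad_map.getD b (0, 0)) 1).map
        (fun o => seqCost o (tblB k))))

lemma tbl_run (m : Nat) :
    (PySem.List.pyRange 0 (m : Int) 1).foldl
      (fun t _ => mkTable (fun a b =>
        intMin ((moveOptions (dpad_map.getD a (0, 0)) (dpad_map.getD b (0, 0)) 1).map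
          (fun o => seqCost o t))))
      (mkTable (fun a b =>
        intMin ((moveOptions (dpad_map.getD a (0, 0)) (dpad_map.getD b (0, 0)) 1).map
          (fun o => (o.length : Int) + 1)))) = tblB m := by
  induction m with
  | zero =>
    rw [PySem.List.pyRange_one_eq_nil (by norm_num)]
    rfl
  | succ m ih =>
    push_cast
    rw [PySem.List.pyRange_one_succ_right (by positivity), List.foldl_append]
    push_cast at ih
    rw [ih]
    simp only [List.foldl_cons, List.foldl_nil]
    rfl

lemma seqCost_eq_of (t : PySem.Dict (String × String) Int) (k : Nat)
    (ht : ∀ a ∈ dpadKeysB, ∀ b ∈ dpadKeysB, t.getD (a, b) 0 = TA k (dpadLookup a) (dpadLookup b))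
    (o : List String) (ho : ∀ s ∈ o, s ∈ dpadKeysB) :
    seqCost o t = dlP (o ++ ["A"]) (k + 1) (2, 0) 1 := by
  simp only [seqCost, List.cons_append]
  rw [show List.drop 1 ("A" :: (o ++ ["A"])) = o ++ ["A"] from rfl]
  have hmap : (fun (ab : String × String) => t.getD ab 0) = fun ab => t.getD (ab.1, ab.2) 0 := by
    funext ab; rfl
  rw [hmap, chainSum (fun a b => t.getD (a, b) 0) (o ++ ["A"]) "A",
    dlP_one_eq_walk k (o ++ ["A"]) (2, 0),
    show ((2 : Int), (0 : Int)) = dpadLookup "A" by decide]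
  refine (posWalk_eq_charWalk (TA k) (fun a b => t.getD (a, b) 0)
    (fun a ha b hb => ht a ha b hb) (o ++ ["A"]) ?_ "A" (by decide) 0).symm
  intro s hs
  rcases List.mem_append.mp hs with h | h
  · exact ho s h
  · rw [List.mem_singleton.mp h]; decide

lemma tbl_char (k : Nat) :
    ∀ a ∈ dpadKeysB, ∀ b ∈ dpadKeysB,
      (tblB k).getD (a, b) 0 = TA k (dpadLookup a) (dpadLookup b) := by
  induction k with
  | zero =>
    intro a ha b hb
    rw [tblB, getD_mkTable _ _ _ ha hb, dmap_eq a ha, dmap_eq b hb, optEq]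
    unfold TA
    refine congrArg intMin (List.map_congr_left ?_)
    intro o _
    simp [dlP]
  | succ k ih =>
    intro a ha b hb
    rw [tblB, getD_mkTable _ _ _ ha hb, dmap_eq a ha, dmap_eq b hb, optEq]
    unfold TA
    refine congrArg intMin (List.map_congr_left ?_)
    intro o hmem
    exact seqCost_eq_of (tblB k) k ih o (fun s hs => optsArrow _ _ _ o hmem s hs)

lemma lk_eq (pt : Int) (d : String) (hd : d ∈ (if pt = 0 then digitKeys else dpadKeys)) :
    (if pt = 0 then digit_map else dpad_map).getD d (0, 0)
      = (if pt = 0 then digitLookup d else dpadLookup d) := by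
  by_cases hpt : pt = 0
  · simp only [hpt] at hd ⊢
    exact gmap_eq d hd
  · simp only [if_neg hpt] at hd ⊢
    exact dmap_eq d hd

-- ===== VERDICT (by name: the statement is the Claim_ definition above) =====
theorem direction_length_spec : Claim_equal_direction_length := by
  intro dirs depth sp pt _ hpre
  unfold Spec_direction_length
  rw [direction_length_eq_dlP]
  by_cases h0 : depth = 0
  · subst h0
    simp [direction_length_alt]
  by_cases hnil : dirs = []
  · subst hnil
    rw [if_neg h0, dlP_nil]
    simp [direction_length_alt]
  rcases hpre with h | h | ⟨h1, _, hkeys⟩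
  · exact absurd h h0
  · exact absurd h hnil
  obtain ⟨m, rfl⟩ : ∃ m : Nat, depth = (m : Int) + 1 := ⟨(depth - 1).toNat, by omega⟩
  have htn : ((m : Int) + 1).toNat = m + 1 := by omega
  rw [if_neg h0, htn]
  unfold direction_length_alt
  rw [if_neg (not_or.mpr ⟨h0, hnil⟩)]
  simp only [dlP]
  cases m with
  | zero =>
    have hc1 : (((0 : Nat) : Int) + 1 = 1) := by norm_num
    simp only [if_pos hc1]
    rw [zipFold (fun d => (if pt = 0 then digit_map else dpad_map).getD d (0, 0))
      (fun p q => intMin ((moveOptions p q pt).map (fun o => (o.length : Int) + 1)))]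
    refine (walk_congr2
      (fun d => (if pt = 0 then digit_map else dpad_map).getD d (0, 0))
      (fun d => if pt = 0 then digitLookup d else dpadLookup d)
      (fun p q => intMin ((moveOptions p q pt).map (fun o => (o.length : Int) + 1)))
      (fun p q => intMin ((directionOptions p q pt).map
        (fun o => dlP (o ++ ["A"]) 0 (2, 0) (if pt = 0 then 1 else pt))))
      ?_ dirs (fun d hd => lk_eq pt d (hkeys d hd)) sp 0).symm
    intro p q
    dsimp only
    rw [optEq]
    refine congrArg intMin (List.map_congr_left ?_)
    intro o _
    simp [dlP]
  | succ mm =>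
    have hc1 : ¬ (((mm + 1 : Nat) : Int) + 1 = 1) := by push_cast; omega
    have hr : ((mm + 1 : Nat) : Int) + 1 - 2 = ((mm : Nat) : Int) := by push_cast; omega
    simp only [if_neg hc1, hr, tbl_run mm]
    rw [zipFold (fun d => (if pt = 0 then digit_map else dpad_map).getD d (0, 0))
      (fun p q => intMin ((moveOptions p q pt).map (fun o => seqCost o (tblB mm))))]
    refine (walk_congr2
      (fun d => (if pt = 0 then digit_map else dpad_map).getD d (0, 0))
      (fun d => if pt = 0 then digitLookup d else dpadLookup d)
      (fun p q => intMin ((moveOptions p q pt).map (fun o => seqCost o (tblB mm))))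
      (fun p q => intMin ((directionOptions p q pt).map
        (fun o => dlP (o ++ ["A"]) (mm + 1) (2, 0) (if pt = 0 then 1 else pt))))
      ?_ dirs (fun d hd => lk_eq pt d (hkeys d hd)) sp 0).symm
    intro p q
    dsimp only
    rw [optEq]
    refine congrArg intMin (List.map_congr_left ?_)
    intro o hmem
    rw [seqCost_eq_of (tblB mm) mm (tbl_char mm) o (fun s hs => optsArrow _ _ _ o hmem s hs)]
    by_cases hpt : pt = 0
    · simp [hpt]
    · rw [if_neg hpt, dlP_ne_zero _ _ _ _ hpt]
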